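-- pv_equiv track=rewrite | github.com/Git4pranay/Leetcode_contest_14-08 | leetcode_contest20/minmum recolor.py | minimumRecolors
-- ===== SOURCE A (Python) =====
-- def minimumRecolors(s,k):
--     for i in range(0,len(s),k):
--         if s[i:i+k].count("B")>=k:
--            return 0
--     ans=[]
--     for i in range(len(s)):
--          s1=s[i:i+k].replace('W','B')
--          if len(s1)==k:
--               ans.append(s[i:i+k])
--
--     k=[]
--     for i in ans:
--         k.append(i.count("W"))
--     return min(k)
-- ===== SOURCE B (Python) =====
-- def minimumRecolors(s, k):
--     n = len(s)
--     pre = [0]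
--     t = 0
--     for c in s:
--         t += c == 'W'
--         pre.append(t)
--     best = pre[n] - pre[n - k]
--     for i in range(n - k + 1):
--         d = pre[i + k] - pre[i]
--         if d < best:
--             best = d
--     return best
-- ===== Notes on version B (the rewrite author's own statement) =====
-- stated objective: faster
-- what changed: A re-slices and re-counts every length-k window (plus a redundant strided all-B prescan and a 'W'->'B' replace just to test the window length); B builds a prefix-sum array of 'W' counts once and takes the minimum of pre[i+k]-pre[i] in a single linear scan.
import Mathlib
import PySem

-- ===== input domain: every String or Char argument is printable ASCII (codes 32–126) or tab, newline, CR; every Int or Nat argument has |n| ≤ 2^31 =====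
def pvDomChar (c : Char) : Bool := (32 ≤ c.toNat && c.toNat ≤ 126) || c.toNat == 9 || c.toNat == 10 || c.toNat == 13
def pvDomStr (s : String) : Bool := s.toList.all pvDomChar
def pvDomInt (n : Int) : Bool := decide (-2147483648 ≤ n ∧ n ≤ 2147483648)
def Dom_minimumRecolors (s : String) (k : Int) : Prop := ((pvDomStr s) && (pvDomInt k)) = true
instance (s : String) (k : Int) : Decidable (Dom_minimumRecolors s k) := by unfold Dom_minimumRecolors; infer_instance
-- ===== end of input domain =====

-- B replaces A's O(n*k) re-slicing/recounting of every window by a prefix-sum array of 'W'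
-- counts with a single O(n) minimum scan; equivalence of the returned value is proved on Pre_.

-- ===== PORT A =====
def minimumRecolors (s : String) (k : Int) : Int :=
  let cs := s.toList
  let n : Int := (cs.length : Int)
  -- first loop: 'for i in range(0, len(s), k): if s[i:i+k].count("B") >= k: return 0'
  if (PySem.List.pyRange 0 n k).any (fun i =>
      decide (k ≤ (PySem.Chars.count (PySem.List.slice cs (some i) (some (i + k))) ['B'] : Int)))
  then 0
  else
    -- second loop: build ans of all slices s[i:i+k] whose 'W'→'B' replacement has length k
    let ans : List (List Char) := (PySem.List.pyRange 0 n 1).foldl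
      (fun acc i =>
        let s1 := PySem.Chars.replace (PySem.List.slice cs (some i) (some (i + k))) ['W'] ['B']
        if (s1.length : Int) = k then acc ++ [PySem.List.slice cs (some i) (some (i + k))] else acc)
      []
    -- third loop: k = [i.count("W") for i in ans]; return min(k)
    let ks : List Int := ans.foldl (fun acc w => acc ++ [(PySem.Chars.count w ['W'] : Int)]) []
    (PySem.List.min? ks (fun x => x)).getD 0   -- Python min(k) raises on [] : excluded by Pre_

-- ===== PORT B =====
def minimumRecolors_alt (s : String) (k : Int) : Int :=
  let cs := s.toList
  let n : Int := (cs.length : Int)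
  -- pre = [0]; t = 0; for c in s: t += c == 'W'; pre.append(t)
  let pt := cs.foldl
    (fun (st : List Int × Int) c =>
      (st.1 ++ [st.2 + (if c = 'W' then 1 else 0)], st.2 + (if c = 'W' then 1 else 0)))
    ([0], 0)
  let pre := pt.1
  -- best = pre[n] - pre[n-k]   (indices in range on Pre_; default 0 is never used there)
  let best := PySem.List.pyGetD pre n 0 - PySem.List.pyGetD pre (n - k) 0
  -- for i in range(n-k+1): d = pre[i+k] - pre[i]; if d < best: best = d
  (PySem.List.pyRange 0 (n - k + 1) 1).foldl
    (fun best i =>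
      let d := PySem.List.pyGetD pre (i + k) 0 - PySem.List.pyGetD pre i 0
      if d < best then d else best)
    best

-- ===== PRECONDITION & SPEC =====
-- Pre_ is exactly the inputs on which the Python A returns: for k ≤ 0 or k > len(s) A raises
-- (ValueError from range(…, 0) when k = 0, else ValueError from min([])).
def Pre_minimumRecolors (s : String) (k : Int) : Prop :=
  1 ≤ k ∧ k ≤ (s.toList.length : Int)
instance (s : String) (k : Int) : Decidable (Pre_minimumRecolors s k) := by
  unfold Pre_minimumRecolors; infer_instance

def pvWitness_minimumRecolors : String × Int := ("WBBWW", 3)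

def Spec_minimumRecolors (s : String) (k : Int) (out : Int) : Prop := out = minimumRecolors_alt s k
instance (s : String) (k : Int) (out : Int) : Decidable (Spec_minimumRecolors s k out) := by
  unfold Spec_minimumRecolors; infer_instance

-- ===== CLAIM (what is proved, stated in full; the proofs are below) =====
def Claim_equal_minimumRecolors : Prop := ∀ (s : String) (k : Int), Dom_minimumRecolors s k → Pre_minimumRecolors s k → Spec_minimumRecolors s k (minimumRecolors s k)

-- ===== LEMMAS AND PROOFS =====

-- 'W'-count of the window of length K starting at i
def pvWin (cs : List Char) (K i : Nat) : Int := (((cs.drop i).take K).count 'W' : Int)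

lemma pv_count_go_singleton (c : Char) (fuel : Nat) (l : List Char) (acc : Nat)
    (h : l.length ≤ fuel) :
    PySem.Chars.count.go [c] fuel l acc = acc + l.count c := by
  induction fuel generalizing l acc with
  | zero =>
    have : l = [] := List.eq_nil_of_length_eq_zero (by omega)
    subst this; simp [PySem.Chars.count.go]
  | succ fuel ih =>
    cases l with
    | nil => simp [PySem.Chars.count.go]
    | cons hd t =>
      have ht : t.length ≤ fuel := by simpa using h
      simp only [PySem.Chars.count.go]
      by_cases hc : c = hd
      · subst hc
        have hp : [c].isPrefixOf (c :: t) = true := by simp [List.isPrefixOf]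
        simp only [hp, List.length_cons, List.length_nil, List.drop_succ_cons, List.drop_zero,
          if_true]
        rw [ih t (acc + 1) ht]
        simp
        omega
      · have hp : [c].isPrefixOf (hd :: t) = false := by
          simp [List.isPrefixOf]; exact fun h' => hc h'
        simp only [hp]
        simp [Ne.symm hc]
        exact ih _ _ ht

-- s.count(c) for a one-character pattern is the character count
lemma pv_count_singleton (s : List Char) (c : Char) :
    PySem.Chars.count s [c] = s.count c := by
  simp [PySem.Chars.count]
  simpa using pv_count_go_singleton c s.length s 0 le_rfl

lemma pv_replace_go_len (a b : Char) (fuel : Nat) (l acc : List Char) :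
    (PySem.Chars.replace.go [a] [b] fuel l acc).length = acc.length + l.length := by
  induction fuel generalizing l acc with
  | zero => simp [PySem.Chars.replace.go]
  | succ fuel ih =>
    cases l with
    | nil => simp [PySem.Chars.replace.go]
    | cons hd t =>
      simp only [PySem.Chars.replace.go]
      by_cases ha : a = hd
      · subst ha
        have hp : [a].isPrefixOf (a :: t) = true := by simp [List.isPrefixOf]
        simp only [hp]
        simp [ih]
        omega
      · have hp : [a].isPrefixOf (hd :: t) = false := by
          simp [List.isPrefixOf]; exact fun h' => ha h'
        simp only [hp]
        simp [ih]
        omega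

-- one-char-for-one-char replace preserves the length
lemma pv_replace_len (s : List Char) (a b : Char) :
    (PySem.Chars.replace s [a] [b]).length = s.length := by
  simp [PySem.Chars.replace]
  simpa using pv_replace_go_len a b s.length s []

lemma pv_countW_cons (c : Char) (l : List Char) :
    ((c :: l).count 'W' : Int) = (l.count 'W' : Int) + (if c = 'W' then 1 else 0) := by
  by_cases hc : c = 'W' <;> simp [hc, Ne.symm, eq_comm]

-- the prefix-sum loop of B
lemma pv_pre_fold (cs : List Char) (acc : List Int) (t : Int) :
    cs.foldl
      (fun (st : List Int × Int) c =>
        (st.1 ++ [st.2 + (if c = 'W' then 1 else 0)], st.2 + (if c = 'W' then 1 else 0)))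
      (acc, t)
    = (acc ++ (List.range cs.length).map (fun j => t + ((cs.take (j+1)).count 'W' : Int)),
       t + (cs.count 'W' : Int)) := by
  induction cs generalizing acc t with
  | nil => simp
  | cons c cs ih =>
    simp only [List.foldl_cons]
    rw [ih]
    refine Prod.ext ?_ ?_
    · rw [List.length_cons, List.range_succ_eq_map]
      simp only [List.map_cons, List.map_map, List.append_assoc]
      congr 1
      simp only [Function.comp_def, List.take_succ_cons, pv_countW_cons, Nat.succ_eq_add_one]
      rw [List.singleton_append]
      congr 1
      · simp
      · apply List.map_congr_left
        intro a _
        ring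
    · simp [pv_countW_cons]; ring

lemma pv_pre_eq (cs : List Char) :
    (cs.foldl
      (fun (st : List Int × Int) c =>
        (st.1 ++ [st.2 + (if c = 'W' then 1 else 0)], st.2 + (if c = 'W' then 1 else 0)))
      ([0], 0)).1
    = (List.range (cs.length + 1)).map (fun j => ((cs.take j).count 'W' : Int)) := by
  rw [pv_pre_fold]
  rw [List.range_succ_eq_map]
  simp [List.map_map, Function.comp_def]

lemma pv_pre_getD (cs : List Char) (j : Nat) (hj : j ≤ cs.length) :
    ((List.range (cs.length + 1)).map (fun j => ((cs.take j).count 'W' : Int))).getD j 0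
    = ((cs.take j).count 'W' : Int) := by
  rw [List.getD_eq_getElem?_getD]
  rw [List.getElem?_map]
  rw [List.getElem?_range (by omega)]
  rfl

lemma pv_window (cs : List Char) (K i : Nat) :
    ((cs.take (i + K)).count 'W' : Int) - ((cs.take i).count 'W' : Int) = pvWin cs K i := by
  unfold pvWin
  rw [List.take_add, List.count_append]
  push_cast
  ring

-- min?-based minimum: membership and lower bound
lemma pv_min_getD_spec (xs : List Int) (h : xs ≠ []) :
    (PySem.List.min? xs (fun y => y)).getD 0 ∈ xs ∧
    ∀ y ∈ xs, (PySem.List.min? xs (fun y => y)).getD 0 ≤ y := by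
  obtain ⟨m, hm⟩ : ∃ m, PySem.List.min? xs (fun y => y) = some m := by
    cases hx : PySem.List.min? xs (fun y => y) with
    | none => exact absurd ((PySem.List.min?_eq_none_iff xs (fun y => y)).mp hx) h
    | some m => exact ⟨m, rfl⟩
  rw [hm]
  exact ⟨PySem.List.min?_mem hm, PySem.List.min?_isMin hm⟩

-- fold-based minimum: membership and lower bound
lemma pv_fold_min_spec (l : List Int) (a : Int) :
    (l.foldl (fun best d => if d < best then d else best) a = a ∨
      l.foldl (fun best d => if d < best then d else best) a ∈ l) ∧
    l.foldl (fun best d => if d < best then d else best) a ≤ a ∧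
    ∀ y ∈ l, l.foldl (fun best d => if d < best then d else best) a ≤ y := by
  have hbody : (fun (best d : Int) => if d < best then d else best) = min := by
    funext best d
    rcases lt_trichotomy d best with h | h | h <;>
      simp [h, le_of_lt]
  rw [hbody]
  exact ⟨PySem.List.foldl_min_mem l a, (PySem.List.foldl_min_le l a).1,
    (PySem.List.foldl_min_le l a).2⟩

lemma pv_min_unique (w : Nat → Int) (m : Nat) (x y : Int)
    (hx1 : ∃ i ≤ m, x = w i) (hx2 : ∀ i ≤ m, x ≤ w i)
    (hy1 : ∃ i ≤ m, y = w i) (hy2 : ∀ i ≤ m, y ≤ w i) : x = y := by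
  obtain ⟨i, hi, rfl⟩ := hx1
  obtain ⟨j, hj, rfl⟩ := hy1
  exact le_antisymm (hx2 j hj) (hy2 i hi)

-- B's value is the minimum of pvWin over 0..n-K
lemma pv_alt_spec (s : String) (k : Int) (K : Nat) (hk : k = (K : Nat)) (h1 : 1 ≤ K)
    (h2 : K ≤ s.toList.length) :
    (∃ i ≤ s.toList.length - K, minimumRecolors_alt s k = pvWin s.toList K i) ∧
    ∀ i ≤ s.toList.length - K, minimumRecolors_alt s k ≤ pvWin s.toList K i := by
  set cs := s.toList with hcs
  set N := cs.length with hN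
  -- the value of a prefix-sum lookup at a Nat index
  have hpre : ∀ (j : Nat), j ≤ N →
      PySem.List.pyGetD ((cs.foldl
        (fun (st : List Int × Int) c =>
          (st.1 ++ [st.2 + (if c = 'W' then 1 else 0)], st.2 + (if c = 'W' then 1 else 0)))
        ([0], 0)).1) ((j : Nat) : Int) 0 = ((cs.take j).count 'W' : Int) := by
    intro j hj
    rw [pv_pre_eq, PySem.List.pyGetD_natCast, pv_pre_getD cs j hj]
  have key : minimumRecolors_alt s k =
      ((PySem.List.pyRange 0 ((N : Int) - k + 1) 1).map
        (fun i => pvWin cs K i.toNat)).foldl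
        (fun best d => if d < best then d else best) (pvWin cs K (N - K)) := by
    unfold minimumRecolors_alt
    simp only [← hcs, ← hN]
    have hinit : PySem.List.pyGetD ((cs.foldl
        (fun (st : List Int × Int) c =>
          (st.1 ++ [st.2 + (if c = 'W' then 1 else 0)], st.2 + (if c = 'W' then 1 else 0)))
        ([0], 0)).1) ((N : Int)) 0 - PySem.List.pyGetD ((cs.foldl
        (fun (st : List Int × Int) c =>
          (st.1 ++ [st.2 + (if c = 'W' then 1 else 0)], st.2 + (if c = 'W' then 1 else 0)))
        ([0], 0)).1) ((N : Int) - k) 0 = pvWin cs K (N - K) := by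
      have e1 : ((N : Int)) = ((N : Nat) : Int) := rfl
      have e2 : ((N : Int) - k) = (((N - K : Nat) : Nat) : Int) := by omega
      rw [e2, hpre N le_rfl, hpre (N - K) (by omega)]
      have e3 : N = (N - K) + K := by omega
      calc ((cs.take N).count 'W' : Int) - ((cs.take (N - K)).count 'W' : Int)
          = ((cs.take ((N - K) + K)).count 'W' : Int) - ((cs.take (N - K)).count 'W' : Int) := by
            rw [← e3]
        _ = pvWin cs K (N - K) := pv_window cs K (N - K)
    rw [hinit]
    rw [List.foldl_map]
    apply PySem.List.foldl_congr_mem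
    intro acc x hx
    have hx' := (PySem.List.mem_pyRange_one (a := 0) (b := (N : Int) - k + 1) (x := x)).mp hx
    have e4 : x + k = ((x.toNat + K : Nat) : Int) := by omega
    have e5 : x = ((x.toNat : Nat) : Int) := by omega
    simp only [e4]
    rw [hpre (x.toNat + K) (by omega)]
    conv_lhs => rw [e5]
    rw [hpre x.toNat (by omega)]
    simp only [Int.toNat_natCast]
    rw [pv_window cs K x.toNat]
  rw [key]
  obtain ⟨hmem, hinit_le, hall⟩ := pv_fold_min_spec
    ((PySem.List.pyRange 0 ((N : Int) - k + 1) 1).map (fun i => pvWin cs K i.toNat))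
    (pvWin cs K (N - K))
  constructor
  · rcases hmem with h | h
    · exact ⟨N - K, le_rfl, h⟩
    · obtain ⟨x, hx, hfx⟩ := List.mem_map.mp h
      have hx' := (PySem.List.mem_pyRange_one).mp hx
      exact ⟨x.toNat, by omega, hfx.symm⟩
  · intro i hi
    have hmm : pvWin cs K i ∈ (PySem.List.pyRange 0 ((N : Int) - k + 1) 1).map
        (fun i => pvWin cs K i.toNat) := by
      refine List.mem_map.mpr ⟨(i : Int), ?_, by simp⟩
      exact (PySem.List.mem_pyRange_one).mpr (by omega)
    exact hall _ hmm

-- A's else-branch value is the minimum of pvWin over 0..n-K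
lemma pv_a_spec (s : String) (k : Int) (K : Nat) (hk : k = (K : Nat)) (h1 : 1 ≤ K)
    (h2 : K ≤ s.toList.length) :
    (∃ i ≤ s.toList.length - K, minimumRecolors s k = pvWin s.toList K i) ∧
      (∀ i ≤ s.toList.length - K, minimumRecolors s k ≤ pvWin s.toList K i) ∨
    minimumRecolors s k = 0 ∧ ∃ i ≤ s.toList.length - K, pvWin s.toList K i = 0 := by
  have hslice : ∀ (i : Int), 0 ≤ i →
      PySem.List.slice s.toList (some i) (some (i + k)) = (s.toList.drop i.toNat).take K := by
    intro i hi
    have e : i = ((i.toNat : Nat) : Int) := by omega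
    rw [e, hk]
    exact PySem.List.slice_natCast_add s.toList i.toNat K
  simp only [minimumRecolors]
  by_cases hany : (PySem.List.pyRange 0 ((s.toList.length : Nat) : Int) k).any (fun i =>
      decide (k ≤ (PySem.Chars.count (PySem.List.slice s.toList (some i) (some (i + k))) ['B'] : Int))) = true
  · right
    refine ⟨by rw [if_pos hany], ?_⟩
    obtain ⟨i, hi, hdec⟩ := List.any_eq_true.mp hany
    have hi' := (PySem.List.mem_pyRange_iff_of_pos (by omega) i).mp hi
    have hcount := of_decide_eq_true hdec
    rw [hslice i (by omega), pv_count_singleton, hk] at hcount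
    have hcnt : K ≤ ((s.toList.drop i.toNat).take K).count 'B' := by exact_mod_cast hcount
    have hlen : ((s.toList.drop i.toNat).take K).length ≤ K := by
      simp [List.length_take]
    have hcle : ((s.toList.drop i.toNat).take K).count 'B' ≤ ((s.toList.drop i.toNat).take K).length :=
      List.count_le_length
    have hall : ∀ b ∈ (s.toList.drop i.toNat).take K, 'B' = b := List.count_eq_length.mp (by omega)
    have hlen2 : ((s.toList.drop i.toNat).take K).length = min K (s.toList.length - i.toNat) := by
      simp [List.length_take, List.length_drop]
    have hiK : i.toNat ≤ s.toList.length - K := by omega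
    refine ⟨i.toNat, hiK, ?_⟩
    unfold pvWin
    have : ((s.toList.drop i.toNat).take K).count 'W' = 0 := by
      apply List.count_eq_zero.mpr
      intro hmem
      exact absurd (hall _ hmem) (by decide)
    simp [this]
  · left
    rw [if_neg hany]
    rw [PySem.List.foldl_append_ite
      (p := fun i => ((PySem.Chars.replace (PySem.List.slice s.toList (some i) (some (i + k))) ['W'] ['B']).length : Int) = k)
      (f := fun i => PySem.List.slice s.toList (some i) (some (i + k)))]
    rw [PySem.List.foldl_append_singleton_eq_map]
    simp only [List.nil_append, List.map_map]
    have hcond : ∀ (i : Int), 0 ≤ i → i < (s.toList.length : Int) →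
        ((((PySem.Chars.replace (PySem.List.slice s.toList (some i) (some (i + k))) ['W'] ['B']).length : Int) = k) ↔
          i.toNat ≤ s.toList.length - K) := by
      intro i h0 hiN
      rw [hslice i h0, pv_replace_len]
      simp only [List.length_take, List.length_drop]
      omega
    have hval : ∀ (i : Int), 0 ≤ i →
        ((fun w => (PySem.Chars.count w ['W'] : Int)) ∘ (fun i => PySem.List.slice s.toList (some i) (some (i + k)))) i
          = pvWin s.toList K i.toNat := by
      intro i h0
      simp only [Function.comp_apply]
      rw [hslice i h0, pv_count_singleton]
      rfl
    have hmem_of : ∀ (j : Nat), j ≤ s.toList.length - K → pvWin s.toList K j ∈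
        (((PySem.List.pyRange 0 ((s.toList.length : Nat) : Int) 1).filter
          (fun i => decide (((PySem.Chars.replace (PySem.List.slice s.toList (some i) (some (i + k))) ['W'] ['B']).length : Int) = k))).map
          ((fun w => (PySem.Chars.count w ['W'] : Int)) ∘ (fun i => PySem.List.slice s.toList (some i) (some (i + k))))) := by
      intro j hj
      have hjlt : ((j : Nat) : Int) < ((s.toList.length : Nat) : Int) := by
        exact_mod_cast (show j < s.toList.length by omega)
      refine List.mem_map.mpr ⟨(j : Int), List.mem_filter.mpr ⟨?_, ?_⟩, ?_⟩
      · exact (PySem.List.mem_pyRange_one).mpr ⟨by positivity, hjlt⟩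
      · exact decide_eq_true ((hcond _ (by positivity) hjlt).mpr (by simpa using hj))
      · rw [hval _ (by positivity)]; simp
    have hne := List.ne_nil_of_mem (hmem_of 0 (by omega))
    obtain ⟨hmem, hmin⟩ := pv_min_getD_spec _ hne
    constructor
    · obtain ⟨i, hif, hval'⟩ := List.mem_map.mp hmem
      have hif' := List.mem_filter.mp hif
      have hrange := (PySem.List.mem_pyRange_one).mp hif'.1
      have hp := (hcond i (by omega) (by omega)).mp (of_decide_eq_true hif'.2)
      exact ⟨i.toNat, hp, by rw [← hval', hval i (by omega)]⟩
    · intro i hi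
      exact hmin _ (hmem_of i hi)

-- ===== VERDICT (by name: the statement is the Claim_ definition above) =====
theorem minimumRecolors_spec : Claim_equal_minimumRecolors := by
  intro s k _hdom hpre
  obtain ⟨hk1, hk2⟩ := hpre
  have hK : k = ((k.toNat : Nat) : Int) := by omega
  set K := k.toNat with hKdef
  have h1 : 1 ≤ K := by omega
  have h2 : K ≤ s.toList.length := by omega
  unfold Spec_minimumRecolors
  obtain ⟨hb1, hb2⟩ := pv_alt_spec s k K hK h1 h2
  rcases pv_a_spec s k K hK h1 h2 with ⟨ha1, ha2⟩ | ⟨ha0, i0, hi0, hw0⟩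
  · exact pv_min_unique (pvWin s.toList K) (s.toList.length - K) _ _ ha1 ha2 hb1 hb2
  · rw [ha0]
    obtain ⟨j, hj, hbj⟩ := hb1
    have hle : minimumRecolors_alt s k ≤ 0 := hw0 ▸ hb2 i0 hi0
    have hge : 0 ≤ minimumRecolors_alt s k := by
      rw [hbj]; unfold pvWin; positivity
    omega
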